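-- pv_equiv track=rewrite | github.com/tastaslim/Python-Tutorial | day9_data_structures/lists/index.py | rearrange_numbers
-- ===== SOURCE A (Python) =====
-- def rearrange_numbers(arr: list) -> list:
--     if len(arr) == 0:
--         return arr
--
--     # T(n) = O(n), S(n)=O(n)
--     """
--     new_arr = []
--     for element in arr:
--         if element < 0:
--             new_arr.append(element)
--     for element in arr:
--         if element > 0:
--             new_arr.append(element)
--     return new_arr
--     """
--
--     # T(n) = O(n), S(n)=O(1)
--     """
--     i, j = 0, len(arr) - 1
--     while i < j:
--         if arr[i] < 0:
--             i += 1
--         elif arr[j] >= 0: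
--             j -= 1
--         elif arr[i] >= 0 and arr[j] < 0:
--             temp = arr[i]
--             arr[i] = arr[j]
--             arr[j] = temp
--             j -= 1
--             i += 1
--     return arr
--     """
--
--     # Pythonic way
--     return [element for element in arr if element < 0] + [element for element in arr if element >= 0]
-- ===== SOURCE B (Python) =====
-- def rearrange_numbers(arr: list) -> list:
--     # stable sort on the boolean key "is non-negative": negatives (False) first,
--     # each group keeping its original order
--     return sorted(arr, key=lambda e: e >= 0)
-- ===== Notes on version B (the rewrite author's own statement) =====
-- stated objective: idiomatic
-- what changed: Replaces the two filter passes and concatenation with a single stable sort on the boolean key (e >= 0), relying on sort stability to keep each group's order.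
import Mathlib
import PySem

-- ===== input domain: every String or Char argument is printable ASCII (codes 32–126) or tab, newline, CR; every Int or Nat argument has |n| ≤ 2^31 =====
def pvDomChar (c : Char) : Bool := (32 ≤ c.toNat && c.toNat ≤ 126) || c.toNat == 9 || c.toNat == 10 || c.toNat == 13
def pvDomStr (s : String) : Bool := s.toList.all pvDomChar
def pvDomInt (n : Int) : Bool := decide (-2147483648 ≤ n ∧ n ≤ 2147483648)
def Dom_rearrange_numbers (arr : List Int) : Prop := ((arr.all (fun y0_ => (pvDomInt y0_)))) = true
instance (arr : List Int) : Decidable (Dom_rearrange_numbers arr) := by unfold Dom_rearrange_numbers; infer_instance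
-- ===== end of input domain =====

-- B replaces A's two filter passes + concatenation with a single stable sort on the boolean key (e >= 0); same cost class, more idiomatic.


-- ===== PORT A =====
def rearrange_numbers (arr : List Int) : List Int :=
  if arr.length = 0 then arr
  else arr.filter (fun element => decide (element < 0)) ++ arr.filter (fun element => decide (0 ≤ element))

-- ===== PORT B =====
def rearrange_numbers_alt (arr : List Int) : List Int :=
  PySem.List.sorted arr (fun e => decide (0 ≤ e))

-- ===== PRECONDITION & SPEC =====
def Spec_rearrange_numbers (arr : List Int) (out : List Int) : Prop := out = rearrange_numbers_alt arr
instance (arr : List Int) (out : List Int) : Decidable (Spec_rearrange_numbers arr out) := by unfold Spec_rearrange_numbers; infer_instance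

-- ===== CLAIM (what is proved, stated in full; the proofs are below) =====
def Claim_equal_rearrange_numbers : Prop := ∀ (arr : List Int), Dom_rearrange_numbers arr → Spec_rearrange_numbers arr (rearrange_numbers arr)

-- ===== LEMMAS AND PROOFS =====

-- the comparator the stable insertion sort uses for the key (0 ≤ e): "strictly smaller key" = "a negative, b non-negative"
lemma before_eq :
    (fun a b : Int => decide ((decide (0 ≤ a) : Bool) < (decide (0 ≤ b) : Bool)))
      = (fun a b : Int => decide (a < 0) && decide (0 ≤ b)) := by
  funext a b
  by_cases h : 0 ≤ a <;> by_cases h2 : 0 ≤ b <;> simp [h, h2, Bool.lt_iff] 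
  all_goals omega

-- inserting a negative element lands exactly between the negative and non-negative groups
lemma insertBy_neg (x : Int) (hx : x < 0) :
    ∀ (negs nonnegs : List Int), (∀ y ∈ negs, y < 0) → (∀ y ∈ nonnegs, 0 ≤ y) →
    PySem.List.insertBy (fun a b : Int => decide (a < 0) && decide (0 ≤ b)) x (negs ++ nonnegs)
      = (negs ++ [x]) ++ nonnegs := by
  intro negs
  induction negs with
  | nil =>
    intro nonnegs _ h2
    cases nonnegs with
    | nil => simp [PySem.List.insertBy]
    | cons y ys =>
      have hy : 0 ≤ y := h2 y (by simp)
      simp [PySem.List.insertBy, hx, hy]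
  | cons z zs ih =>
    intro nonnegs h1 h2
    have hz : z < 0 := h1 z (by simp)
    have hrec := ih nonnegs (fun y hy => h1 y (by simp [hy])) h2
    simp [PySem.List.insertBy, Int.not_le.mpr hz, hrec]

-- inserting a non-negative element appends it at the very end
lemma insertBy_nonneg (x : Int) (hx : 0 ≤ x) (ys : List Int) :
    PySem.List.insertBy (fun a b : Int => decide (a < 0) && decide (0 ≤ b)) x ys = ys ++ [x] := by
  apply PySem.List.insertBy_of_forall_not_before
  intro y _
  simp [Int.not_lt.mpr hx]

-- loop invariant for the insertion-sort fold: the accumulator stays "negatives ++ non-negatives"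
lemma fold_invariant (xs : List Int) :
    ∀ (negs nonnegs : List Int), (∀ y ∈ negs, y < 0) → (∀ y ∈ nonnegs, 0 ≤ y) →
    xs.foldl (fun acc x => PySem.List.insertBy
        (fun a b : Int => decide (a < 0) && decide (0 ≤ b)) x acc) (negs ++ nonnegs)
      = (negs ++ xs.filter (fun e => decide (e < 0))) ++ (nonnegs ++ xs.filter (fun e => decide (0 ≤ e))) := by
  induction xs with
  | nil => intro negs nonnegs _ _; simp
  | cons x xs ih =>
    intro negs nonnegs h1 h2
    by_cases hx : x < 0
    · have hstep := insertBy_neg x hx negs nonnegs h1 h2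
      have hneg : ∀ y ∈ negs ++ [x], y < 0 := by
        intro y hy
        rcases List.mem_append.mp hy with h | h
        · exact h1 y h
        · simp at h; omega
      have hrec := ih (negs ++ [x]) nonnegs hneg h2
      simp only [List.foldl_cons, hstep, hrec, List.filter_cons, decide_eq_true hx,
        decide_eq_false (Int.not_le.mpr hx)]
      simp
    · rw [Int.not_lt] at hx
      have hstep := insertBy_nonneg x hx (negs ++ nonnegs)
      have hnn : ∀ y ∈ nonnegs ++ [x], 0 ≤ y := by
        intro y hy
        rcases List.mem_append.mp hy with h | h
        · exact h2 y h
        · simp at h; omega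
      have hrec := ih negs (nonnegs ++ [x]) h1 hnn
      simp only [List.foldl_cons, hstep, List.append_assoc] at *
      simp only [hrec, List.filter_cons, decide_eq_true hx,
        decide_eq_false (Int.not_lt.mpr hx)]
      simp

-- ===== VERDICT (by name: the statement is the Claim_ definition above) =====
theorem rearrange_numbers_spec : Claim_equal_rearrange_numbers := by
  intro arr _
  unfold Spec_rearrange_numbers rearrange_numbers rearrange_numbers_alt
  rw [PySem.List.sorted_eq_foldl_insertBy, before_eq]
  have h := fold_invariant arr [] [] (by simp) (by simp)
  simp only [List.nil_append] at h
  rw [h]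
  cases arr with
  | nil => simp
  | cons a l => simp
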